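-- pv_equiv track=rewrite | github.com/Quanmuito/bigoblue35 | 1_Dynamic_Array_and_String/task8.py | hasCommonCharsInOrder
-- ===== SOURCE A (Python) =====
-- def hasCommonCharsInOrder(str1, str2):
--     commonOrder = True
--     lastIndex = 0
--
--     for char in str1:
--         # Go through each character in str1
--         # If found in str2, find the next character from that character in str2 to the end
--         lastIndex = str2.find(char, lastIndex)
--
--         if (lastIndex == -1):
--             commonOrder = False
--             break
--
--     return commonOrder
-- ===== SOURCE B (Python) =====
-- def hasCommonCharsInOrder(str1, str2):
--     # Two-phase: build an index char -> list of its positions in str2 (ascending),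
--     # then walk str1 taking for each char the first stored position >= last.
--     positions = {}
--     for i, ch in enumerate(str2):
--         positions.setdefault(ch, []).append(i)
--     last = 0
--     for ch in str1:
--         hit = None
--         for j in positions.get(ch, []):
--             if j >= last:
--                 hit = j
--                 break
--         if hit is None:
--             return False
--         last = hit
--     return True
-- ===== Notes on version B (the rewrite author's own statement) =====
-- stated objective: alternative
-- what changed: A repeatedly calls str2.find(char, lastIndex) (a fresh scan of str2 per char of str1); B first builds a per-character index of str2's positions in one pass and then resolves each char of str1 against its own position list (first stored position >= last).
import Mathlib
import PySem

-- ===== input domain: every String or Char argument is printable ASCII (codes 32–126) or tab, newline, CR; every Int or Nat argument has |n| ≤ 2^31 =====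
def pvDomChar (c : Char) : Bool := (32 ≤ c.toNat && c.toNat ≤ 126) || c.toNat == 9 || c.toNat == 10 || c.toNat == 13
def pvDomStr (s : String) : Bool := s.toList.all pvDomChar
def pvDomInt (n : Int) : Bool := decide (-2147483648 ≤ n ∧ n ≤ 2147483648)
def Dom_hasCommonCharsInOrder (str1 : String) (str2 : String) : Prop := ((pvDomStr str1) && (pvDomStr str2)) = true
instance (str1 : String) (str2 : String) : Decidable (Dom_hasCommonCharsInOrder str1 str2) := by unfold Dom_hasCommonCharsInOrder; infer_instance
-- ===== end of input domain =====

-- B replaces A's repeated str2.find(char, lastIndex) scans by a two-phase algorithm: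
-- build a per-character positions index of str2 once, then resolve each char of str1
-- against its own position list (first stored position >= last).

-- ===== PORT A =====
-- the for-loop over str1's characters with state lastIndex; 'commonOrder = False; break'
-- ports to returning false immediately (the remaining iterations are skipped by the break)
def hasCommonCharsInOrder.go (str2 : String) : List Char → Int → Bool
  | [], _ => true
  | c :: rest, lastIndex =>
    let i := PySem.Str.findFrom str2 (String.singleton c) lastIndex
    if i = -1 then false else hasCommonCharsInOrder.go str2 rest i

def hasCommonCharsInOrder (str1 : String) (str2 : String) : Bool :=
  hasCommonCharsInOrder.go str2 str1.toList 0

-- ===== PORT B =====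
-- phase 1 of Source B: for i, ch in enumerate(str2): positions.setdefault(ch, []).append(i)
def hasCommonCharsInOrder_alt.build (l : List (Int × Char)) : PySem.Dict Char (List Int) :=
  l.foldl (fun d p => d.modify p.2 [] (fun js => js ++ [p.1])) PySem.Dict.empty

-- phase 2 of Source B: the for-loop over str1 with state last; the inner
-- 'for j in positions.get(ch, []): if j >= last: hit = j; break' is List.find?
def hasCommonCharsInOrder_alt.loop (pos : PySem.Dict Char (List Int)) : List Char → Int → Bool
  | [], _ => true
  | c :: rest, last =>
    match (pos.getD c []).find? (fun j => decide (last ≤ j)) with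
    | none => false
    | some j => hasCommonCharsInOrder_alt.loop pos rest j

def hasCommonCharsInOrder_alt (str1 : String) (str2 : String) : Bool :=
  hasCommonCharsInOrder_alt.loop
    (hasCommonCharsInOrder_alt.build (PySem.List.enumerate str2.toList 0))
    str1.toList 0

-- ===== PRECONDITION & SPEC =====
def Spec_hasCommonCharsInOrder (str1 : String) (str2 : String) (out : Bool) : Prop := out = hasCommonCharsInOrder_alt str1 str2
instance (str1 : String) (str2 : String) (out : Bool) : Decidable (Spec_hasCommonCharsInOrder str1 str2 out) := by unfold Spec_hasCommonCharsInOrder; infer_instance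

-- ===== CLAIM =====
def Claim_equal_hasCommonCharsInOrder : Prop := ∀ (str1 : String) (str2 : String), Dom_hasCommonCharsInOrder str1 str2 → Spec_hasCommonCharsInOrder str1 str2 (hasCommonCharsInOrder str1 str2)

-- ===== LEMMAS AND PROOFS =====

-- the ascending list of positions of c in s (what B's index stores under key c)
def posIdx (s : List Char) (c : Char) : List Int :=
  ((PySem.List.enumerate s 0).filter (fun p => p.2 == c)).map (·.1)

-- B's built dict stores exactly posIdx under each key
theorem build_getD_aux (c : Char) (l : List (Int × Char)) (d : PySem.Dict Char (List Int)) :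
    (l.foldl (fun d p => d.modify p.2 [] (fun js => js ++ [p.1])) d).getD c []
      = d.getD c [] ++ (l.filter (fun p => p.2 == c)).map (·.1) := by
  induction l generalizing d with
  | nil => simp
  | cons p rest ih =>
    rw [List.foldl_cons, ih, List.filter_cons]
    by_cases h : (p.2 == c) = true
    · have hc : p.2 = c := by simpa using h
      rw [if_pos h, PySem.Dict.getD_modify]
      simp [hc]
    · rw [if_neg h, PySem.Dict.getD_modify]
      have hc : ¬ c = p.2 := by intro hcc; exact h (by simpa using hcc.symm)
      simp [hc]

theorem build_getD (s : List Char) (c : Char) :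
    (hasCommonCharsInOrder_alt.build (PySem.List.enumerate s 0)).getD c [] = posIdx s c := by
  rw [hasCommonCharsInOrder_alt.build, build_getD_aux, posIdx]
  simp

theorem mem_posIdx {s : List Char} {c : Char} {j : Int} (h : j ∈ posIdx s c) :
    ∃ (k : Nat) (hk : k < s.length), j = (k : Int) ∧ s[k] = c := by
  rw [posIdx] at h
  obtain ⟨p, hp, hj⟩ := List.mem_map.mp h
  obtain ⟨hmem, hc⟩ := List.mem_filter.mp hp
  obtain ⟨k, hk, hpk⟩ := (PySem.List.mem_enumerate_iff _ _ _).mp hmem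
  refine ⟨k, hk, ?_, ?_⟩
  · rw [← hj, hpk]; simp
  · have := (beq_iff_eq).mp hc
    rw [hpk] at this; simpa using this

theorem posIdx_mem_of (s : List Char) (c : Char) (k : Nat) (hk : k < s.length) (hc : s[k] = c) :
    ((k : Int)) ∈ posIdx s c := by
  rw [posIdx]
  refine List.mem_map.mpr ⟨((k : Int), s[k]), ?_, by simp⟩
  refine List.mem_filter.mpr ⟨?_, by simpa using hc⟩
  exact (PySem.List.mem_enumerate_iff _ _ _).mpr ⟨k, hk, by simp⟩

theorem posIdx_pairwise (s : List Char) (c : Char) :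
    (posIdx s c).Pairwise (· < ·) := by
  rw [posIdx]
  refine List.Pairwise.map _ (fun a b h => h) ?_
  exact List.Pairwise.sublist List.filter_sublist (PySem.List.pairwise_lt_enumerate s 0)

-- in a strictly increasing list, find? (k ≤ ·) returns the least member ≥ k
theorem find_ge_first {l : List Int} {k j : Int} (hp : l.Pairwise (· < ·))
    (hj : j ∈ l) (hkj : k ≤ j) (hmin : ∀ i ∈ l, k ≤ i → j ≤ i) :
    l.find? (fun i => decide (k ≤ i)) = some j := by
  induction l with
  | nil => cases hj
  | cons x xs ih =>
    by_cases hx : k ≤ x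
    · have hjx : j = x := by
        have hjle : j ≤ x := hmin x List.mem_cons_self hx
        rcases List.mem_cons.mp hj with h | h
        · exact h
        · exact absurd hjle (not_le.mpr ((List.pairwise_cons.mp hp).1 j h))
      rw [List.find?_cons_of_pos (by simpa using hx)]
      exact congrArg some hjx.symm
    · have hjx : j ≠ x := fun h => hx (h ▸ hkj)
      have hjxs : j ∈ xs := (List.mem_cons.mp hj).resolve_left hjx
      rw [List.find?_cons_of_neg (by simpa using hx)]
      exact ih (List.pairwise_cons.mp hp).2 hjxs
        (fun i hi hki => hmin i (List.mem_cons_of_mem _ hi) hki)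

-- singleton infix is membership
theorem singleton_infix_iff (c : Char) (t : List Char) : [c] <:+: t ↔ c ∈ t := by
  constructor
  · intro h; exact h.subset (List.mem_singleton_self c)
  · intro h
    obtain ⟨p, q, hpq⟩ := List.mem_iff_append.mp h
    exact ⟨p, q, by simpa using hpq.symm⟩

-- the bridge: A's findFrom step computes exactly B's lookup in the positions index
theorem stepA (s : List Char) (c : Char) (k : Nat) (hk : k ≤ s.length) :
    PySem.Chars.findFrom s [c] (k : Int)
      = ((posIdx s c).find? (fun j => decide ((k : Int) ≤ j))).getD (-1) := by
  rw [PySem.Chars.findFrom_natCast s [c] k hk]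
  set t := s.drop k with ht
  by_cases hneg : PySem.Chars.find t [c] = -1
  · rw [if_pos hneg]
    have hnm : c ∉ t := fun hm =>
      (PySem.Chars.find_eq_neg_one_iff t [c]).mp hneg ((singleton_infix_iff c t).mpr hm)
    have : (posIdx s c).find? (fun j => decide ((k : Int) ≤ j)) = none := by
      refine List.find?_eq_none.mpr (fun j hj => ?_)
      obtain ⟨m, hm, hjm, hsm⟩ := mem_posIdx hj
      simp only [decide_eq_true_eq]
      intro hkj
      have hkm : k ≤ m := by omega
      have : c ∈ t := by
        rw [ht]
        have hmk : m - k < s.length - k := by omega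
        have : (s.drop k)[m - k]'(by simpa using hmk) = s[m] := by
          rw [List.getElem_drop]; congr 1; omega
        rw [← hsm, ← this]
        exact List.getElem_mem _
      exact hnm this
    rw [this]; rfl
  · rw [if_neg hneg]
    have hge : 0 ≤ PySem.Chars.find t [c] := by
      have := PySem.Chars.neg_one_le_find t [c]; omega
    set r : Nat := (PySem.Chars.find t [c]).toNat with hr
    have hfr : PySem.Chars.find t [c] = (r : Int) := (Int.toNat_of_nonneg hge).symm
    obtain ⟨hpre, hmin⟩ := PySem.Chars.find_spec (s := t) (sub := [c]) hge
    obtain ⟨u, hu⟩ := hpre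
    have hdrop : t.drop r = c :: u := by simpa using hu.symm
    have hrlt : r < t.length := by
      have := List.length_drop (l := t) (i := r)
      rw [hdrop] at this; simp at this; omega
    have htlen : t.length = s.length - k := by rw [ht]; simp
    have hjlt : k + r < s.length := by omega
    have e1 : t[r]'hrlt = c := by
      have h2 : (t.drop r)[0]'(by rw [hdrop]; simp) = c := by simp [hdrop]
      rw [List.getElem_drop] at h2
      simpa using h2
    have hsj : s[k + r]'hjlt = c := by
      have e1' : (List.drop k s)[r]'(by simp; omega) = c := e1
      rw [List.getElem_drop] at e1'
      exact e1'
    have hjmem : (((k + r : Nat) : Int)) ∈ posIdx s c := posIdx_mem_of s c (k + r) hjlt hsj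
    have hfind : (posIdx s c).find? (fun j => decide ((k : Int) ≤ j)) = some ((k + r : Nat) : Int) := by
      refine find_ge_first (posIdx_pairwise s c) hjmem (by push_cast; omega) ?_
      intro i hi hki
      obtain ⟨m, hm, him, hsm⟩ := mem_posIdx hi
      by_contra hlt
      rw [not_le] at hlt
      have hmk : k ≤ m := by omega
      have hmr : m - k < r := by omega
      refine hmin (m - k) hmr ⟨t.drop (m - k + 1), ?_⟩
      have hmt : m - k < t.length := by omega
      have hmt' : m - k < (List.drop k s).length := by simp; omega
      have htm : t[m - k]'hmt = c := by
        have e2 : (List.drop k s)[m - k]'hmt' = s[k + (m - k)]'(by omega) :=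
          List.getElem_drop ..
        have e3 : t[m - k]'hmt = s[k + (m - k)]'(by omega) := e2
        rw [e3]
        have hkm' : k + (m - k) = m := by omega
        simp only [hkm']
        exact hsm
      rw [List.drop_eq_getElem_cons hmt, htm]
      rfl
    rw [hfind, hfr, Option.getD_some]
    push_cast
    ring

-- loop invariant: A's go with lastIndex k equals B's loop over the built index
theorem goA_eq_loop (str2 : String) (l1 : List Char) (k : Nat) (hk : k ≤ str2.toList.length) :
    hasCommonCharsInOrder.go str2 l1 (k : Int)
      = hasCommonCharsInOrder_alt.loop
          (hasCommonCharsInOrder_alt.build (PySem.List.enumerate str2.toList 0)) l1 (k : Int) := by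
  induction l1 generalizing k with
  | nil => rw [hasCommonCharsInOrder.go, hasCommonCharsInOrder_alt.loop]
  | cons c rest ih =>
    rw [hasCommonCharsInOrder.go, hasCommonCharsInOrder_alt.loop, build_getD]
    simp only [PySem.Str.findFrom_eq, String.toList_singleton]
    rw [stepA str2.toList c k hk]
    cases hres : (posIdx str2.toList c).find? (fun j => decide ((k : Int) ≤ j)) with
    | none => simp
    | some j =>
      obtain ⟨m, hm, hjm, _⟩ := mem_posIdx (List.mem_of_find?_eq_some hres)
      simp only [Option.getD_some]
      rw [if_neg (by omega), hjm]
      exact ih m (le_of_lt hm)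

-- ===== VERDICT =====
theorem hasCommonCharsInOrder_spec : Claim_equal_hasCommonCharsInOrder := by
  intro str1 str2 _
  unfold Spec_hasCommonCharsInOrder hasCommonCharsInOrder hasCommonCharsInOrder_alt
  have := goA_eq_loop str2 str1.toList 0 (Nat.zero_le _)
  simpa using this
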